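-- pv_equiv track=rewrite | github.com/xpomota/ya_mentor | drop_nulls.py | drop_nulls
-- ===== SOURCE A (Python) =====
-- def drop_nulls(array):
--     """ Удаление из списка целых чисел нулей  """
--     index = 0
--     for item in array:
--         if item != 0:
--             array[index] = item
--             index += 1
--     # Красиво использовать array[:index], но нет уверенности, что
--     # эта операция по памяти будет O(1)
--     # Поэтому отрезаем лишние элементы с конца массива
--     for _ in range(index, len(array)):
--         array.pop()
--     return array
-- ===== SOURCE B (Python) =====
-- def drop_nulls(array):
--     """ Удаление из списка целых чисел нулей  """
--     while 0 in array:
--         array.remove(0)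
--     return array
-- ===== Notes on version B (the rewrite author's own statement) =====
-- stated objective: alternative
-- what changed: Replaces A's single-pass two-pointer in-place compaction plus tail pops with a repeated-scan loop that removes the first zero while any zero remains.
import Mathlib
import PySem

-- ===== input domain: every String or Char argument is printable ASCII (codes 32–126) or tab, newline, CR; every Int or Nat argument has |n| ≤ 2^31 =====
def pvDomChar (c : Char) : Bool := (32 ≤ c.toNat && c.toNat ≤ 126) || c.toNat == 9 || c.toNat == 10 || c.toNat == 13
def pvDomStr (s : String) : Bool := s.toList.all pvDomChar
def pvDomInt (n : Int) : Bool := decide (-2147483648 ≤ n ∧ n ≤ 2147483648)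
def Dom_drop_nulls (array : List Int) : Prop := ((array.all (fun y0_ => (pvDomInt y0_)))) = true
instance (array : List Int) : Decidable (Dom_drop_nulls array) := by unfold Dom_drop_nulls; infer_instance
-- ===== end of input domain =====

-- B replaces A's two-pointer in-place compaction by a repeated remove-first-zero loop
-- ('while 0 in array: array.remove(0)'); same return value, and both Pythons mutate
-- the argument list in place (the equivalence proved here is about the return value).

-- ===== PORT A =====
-- first loop of A: iterate positions 0..n-1 of the live list (fuel = remaining
-- positions), writing non-zero items forward at position `idx`.
def dropNullsWrite : Nat → Nat → Nat → List Int → List Int × Nat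
  | 0, _, idx, arr => (arr, idx)
  | n + 1, i, idx, arr =>
    let item := arr.getD i 0
    if item ≠ 0 then dropNullsWrite n (i + 1) (idx + 1) (arr.set idx item)
    else dropNullsWrite n (i + 1) idx arr

-- second loop of A: `for _ in range(index, len(array)): array.pop()`
def dropNullsPop : Nat → List Int → List Int
  | 0, arr => arr
  | k + 1, arr => dropNullsPop k arr.dropLast

def drop_nulls (array : List Int) : List Int :=
  let st := dropNullsWrite array.length 0 0 array
  dropNullsPop (array.length - st.2) st.1

-- ===== PORT B =====
-- `while 0 in array: array.remove(0)`; fuel = length bounds the iteration count.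
def dropNullsRemove : Nat → List Int → List Int
  | 0, arr => arr
  | n + 1, arr => if arr.contains 0 then dropNullsRemove n (arr.erase 0) else arr

def drop_nulls_alt (array : List Int) : List Int :=
  dropNullsRemove array.length array

-- ===== PRECONDITION & SPEC =====
def Spec_drop_nulls (array : List Int) (out : List Int) : Prop := out = drop_nulls_alt array
instance (array : List Int) (out : List Int) : Decidable (Spec_drop_nulls array out) := by unfold Spec_drop_nulls; infer_instance

-- ===== CLAIM (what is proved, stated in full; the proofs are below) =====
def Claim_equal_drop_nulls : Prop := ∀ (array : List Int), Dom_drop_nulls array → Spec_drop_nulls array (drop_nulls array)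

-- ===== LEMMAS AND PROOFS =====

-- erasing a zero does not change the zero-free filter.
theorem filter_erase_zero (l : List Int) :
    (l.erase 0).filter (fun x => x ≠ 0) = l.filter (fun x => x ≠ 0) := by
  induction l with
  | nil => simp
  | cons a t ih =>
    by_cases ha : a = 0
    · subst ha; simp
    · rw [List.erase_cons, if_neg (by simpa using ha), List.filter_cons, List.filter_cons, ih]

-- B's loop computes the zero-free filter whenever the fuel covers the zero count.
theorem dropNullsRemove_filter (n : Nat) :
    ∀ (arr : List Int), arr.count 0 ≤ n →
      dropNullsRemove n arr = arr.filter (fun x => x ≠ 0) := by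
  induction n with
  | zero =>
    intro arr h
    have h0 : (0 : Int) ∉ arr := by
      intro hm
      have := List.count_pos_iff.mpr hm
      omega
    rw [dropNullsRemove]
    refine (List.filter_eq_self.mpr ?_).symm
    intro a ha
    simp only [ne_eq, decide_eq_true_eq]
    intro h'; subst h'; exact h0 ha
  | succ n ih =>
    intro arr h
    by_cases hc : arr.contains 0
    · have hm : (0 : Int) ∈ arr := by simpa using hc
      have hcount : (arr.erase 0).count 0 ≤ n := by
        have := List.count_erase_self (a := (0 : Int)) (l := arr)
        have hpos := List.count_pos_iff.mpr hm
        omega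
      rw [dropNullsRemove, if_pos hc, ih _ hcount, filter_erase_zero]
    · have hm : (0 : Int) ∉ arr := by simpa using hc
      rw [dropNullsRemove, if_neg hc]
      refine (List.filter_eq_self.mpr ?_).symm
      intro a ha
      simp only [ne_eq, decide_eq_true_eq]
      intro h'; subst h'; exact hm ha

-- popping k elements off the end leaves the first (length - k) elements.
theorem dropNullsPop_take (k : Nat) :
    ∀ (arr : List Int), dropNullsPop k arr = arr.take (arr.length - k) := by
  induction k with
  | zero => intro arr; simp [dropNullsPop]
  | succ k ih =>
    intro arr
    rw [dropNullsPop, ih, List.dropLast_eq_take, List.take_take, List.length_take]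
    congr 1
    omega

-- invariant of A's first loop over the original list `a`.
theorem dropNullsWrite_invariant (a : List Int) (n : Nat) :
    ∀ (i idx : Nat) (arr : List Int),
      i + n = a.length → idx ≤ i → arr.length = a.length →
      arr.take idx = (a.take i).filter (fun x => x ≠ 0) →
      arr.drop i = a.drop i →
      (dropNullsWrite n i idx arr).1.take (dropNullsWrite n i idx arr).2
          = a.filter (fun x => x ≠ 0)
        ∧ (dropNullsWrite n i idx arr).1.length = a.length
        ∧ (dropNullsWrite n i idx arr).2 = (a.filter (fun x => x ≠ 0)).length := by
  induction n with
  | zero =>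
    intro i idx arr hi hidx hlen htake hdrop
    have hia : i = a.length := by omega
    have : a.take i = a := by rw [hia]; exact List.take_length
    refine ⟨?_, hlen, ?_⟩
    · simpa [dropNullsWrite, this] using htake
    · have hlen2 := congrArg List.length htake
      rw [List.length_take] at hlen2
      have hidxle : idx ≤ arr.length := by omega
      rw [Nat.min_eq_left hidxle, hia] at hlen2
      simpa [dropNullsWrite] using hlen2
  | succ n ih =>
    intro i idx arr hi hidx hlen htake hdrop
    have hilt : i < a.length := by omega
    have hai : a.drop i = a[i] :: a.drop (i + 1) := List.drop_eq_getElem_cons hilt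
    have hget : arr.getD i 0 = a[i] := by
      have : arr[i]? = a[i]? := by
        have h1 : (arr.drop i)[0]? = (a.drop i)[0]? := by rw [hdrop]
        simpa using h1
      simp [List.getD, this, List.getElem?_eq_getElem hilt]
    by_cases hz : a[i] = 0
    · -- zero: skip
      rw [dropNullsWrite]
      simp only [hget, hz, ne_eq, not_true_eq_false, ite_false]
      apply ih (i + 1) idx arr (by omega) (by omega) hlen
      · rw [List.take_add_one, htake, List.filter_append]
        simp [List.getElem?_eq_getElem hilt, hz]
      · have : arr.drop (i + 1) = (arr.drop i).drop 1 := by simp [List.drop_drop]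
        rw [this, hdrop, List.drop_drop]
    · -- non-zero: write at idx
      rw [dropNullsWrite]
      simp only [hget, ne_eq, hz, not_false_eq_true, if_pos]
      have hidxlt : idx < arr.length := by omega
      apply ih (i + 1) (idx + 1) (arr.set idx a[i]) (by omega) (by omega) (by simpa using hlen)
      · rw [List.take_add_one]
        rw [List.take_set]
        have hsetoob : (arr.take idx).set idx a[i] = arr.take idx := by
          apply List.set_eq_of_length_le
          simp only [List.length_take]; omega
        rw [hsetoob, htake, List.take_add_one, List.filter_append]
        have : (arr.set idx a[i])[idx]? = some a[i] := by
          rw [List.getElem?_eq_getElem (by simpa using hidxlt)]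
          simp
        simp [this, List.getElem?_eq_getElem hilt, hz]
      · rw [List.drop_set]
        rw [if_pos (by omega)]
        have : arr.drop (i + 1) = (arr.drop i).drop 1 := by simp [List.drop_drop]
        rw [this, hdrop, List.drop_drop]

theorem drop_nulls_eq_filter (a : List Int) :
    drop_nulls a = a.filter (fun x => x ≠ 0) := by
  have h := dropNullsWrite_invariant a a.length 0 0 a (by omega) (by omega) rfl (by simp) (by simp)
  unfold drop_nulls
  rw [dropNullsPop_take, h.2.1, h.2.2]
  have hle : (a.filter (fun x => x ≠ 0)).length ≤ a.length := List.length_filter_le _ _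
  have : a.length - (a.length - (a.filter (fun x => x ≠ 0)).length)
      = (a.filter (fun x => x ≠ 0)).length := by omega
  rw [this]
  calc (dropNullsWrite a.length 0 0 a).1.take (a.filter (fun x => x ≠ 0)).length
      = (dropNullsWrite a.length 0 0 a).1.take (dropNullsWrite a.length 0 0 a).2 := by rw [h.2.2]
    _ = a.filter (fun x => x ≠ 0) := h.1

theorem drop_nulls_alt_eq_filter (a : List Int) :
    drop_nulls_alt a = a.filter (fun x => x ≠ 0) := by
  unfold drop_nulls_alt
  exact dropNullsRemove_filter a.length a (List.count_le_length)

-- ===== VERDICT (by name: the statement is the Claim_ definition above) =====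
theorem drop_nulls_spec : Claim_equal_drop_nulls := by
  intro array _
  unfold Spec_drop_nulls
  rw [drop_nulls_eq_filter, drop_nulls_alt_eq_filter]
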